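-- pv_equiv track=rewrite | github.com/Nortlove/Adam_Luxy | scripts/run_specialty_reviews_learning.py | _normalize_podcast_category
-- ===== SOURCE A (Python) =====
-- def _normalize_podcast_category(category: str) -> str:
--     cat_lower = category.lower() if category else ""
--     if any(x in cat_lower for x in ["comedy", "humor", "funny"]):
--         return "comedy"
--     elif any(x in cat_lower for x in ["news", "politics", "current"]):
--         return "news"
--     elif any(x in cat_lower for x in ["crime", "mystery", "true crime"]):
--         return "true crime"
--     elif any(x in cat_lower for x in ["education", "learning", "history", "science"]):
--         return "education"
--     elif any(x in cat_lower for x in ["business", "finance", "entrepreneur", "career"]):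
--         return "business"
--     elif any(x in cat_lower for x in ["health", "fitness", "wellness", "mental"]):
--         return "health"
--     elif any(x in cat_lower for x in ["sport", "football", "basketball", "soccer"]):
--         return "sports"
--     elif any(x in cat_lower for x in ["music", "song", "artist"]):
--         return "music"
--     elif any(x in cat_lower for x in ["society", "culture", "relationship"]):
--         return "society"
--     elif any(x in cat_lower for x in ["tech", "technology", "computer", "internet"]):
--         return "technology"
--     return "general"
-- ===== SOURCE B (Python) =====
-- _GENRES = ["comedy", "news", "true crime", "education", "business",
--            "health", "sports", "music", "society", "technology"]
--
-- # flat keyword table: keyword -> priority (= index of its genre in _GENRES)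
-- _KEYWORDS = [
--     ("comedy", 0), ("humor", 0), ("funny", 0),
--     ("news", 1), ("politics", 1), ("current", 1),
--     ("crime", 2), ("mystery", 2), ("true crime", 2),
--     ("education", 3), ("learning", 3), ("history", 3), ("science", 3),
--     ("business", 4), ("finance", 4), ("entrepreneur", 4), ("career", 4),
--     ("health", 5), ("fitness", 5), ("wellness", 5), ("mental", 5),
--     ("sport", 6), ("football", 6), ("basketball", 6), ("soccer", 6),
--     ("music", 7), ("song", 7), ("artist", 7),
--     ("society", 8), ("culture", 8), ("relationship", 8),
--     ("tech", 9), ("technology", 9), ("computer", 9), ("internet", 9),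
-- ]
--
--
-- def _normalize_podcast_category(category: str) -> str:
--     # Text-driven scan: walk every position of the lowered text once, try each
--     # keyword at that position, and keep the minimum priority seen; the genre
--     # is looked up from the priority at the end.
--     cat = category.lower() if category else ""
--     best = None
--     for i in range(len(cat)):
--         for kw, prio in _KEYWORDS:
--             if cat.startswith(kw, i) and (best is None or prio < best):
--                 best = prio
--     return _GENRES[best] if best is not None else "general"
-- ===== Notes on version B (the rewrite author's own statement) =====
-- stated objective: alternative
-- what changed: Replaced the rule-driven if/elif chain of substring tests by a text-driven scan: one walk over every position of the lowered string matching a flat keyword table at each position, keeping the minimum keyword priority and looking the genre up from it at the end.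
import Mathlib
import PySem

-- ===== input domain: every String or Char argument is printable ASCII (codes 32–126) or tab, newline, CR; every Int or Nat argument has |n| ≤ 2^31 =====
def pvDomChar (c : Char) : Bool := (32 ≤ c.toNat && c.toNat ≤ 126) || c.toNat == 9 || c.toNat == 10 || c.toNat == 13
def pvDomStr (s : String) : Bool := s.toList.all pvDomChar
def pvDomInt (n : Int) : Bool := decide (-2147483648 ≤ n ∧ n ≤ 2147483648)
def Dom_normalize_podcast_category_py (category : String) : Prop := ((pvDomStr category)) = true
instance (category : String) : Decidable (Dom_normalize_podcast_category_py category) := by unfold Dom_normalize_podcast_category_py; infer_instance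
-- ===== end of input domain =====

-- B replaces A's rule-driven if/elif chain of substring tests by a text-driven scan: it walks
-- every position of the lowered text once, matches the flat keyword table at each position, and
-- keeps the minimum keyword priority, looking the genre up from the priority at the end;
-- objective: alternative (same result, genuinely different traversal; not faster).

-- ===== PORT A =====
def normalize_podcast_category_py (category : String) : String :=
  let cat_lower := if category ≠ "" then PySem.Str.lower category else ""
  if ["comedy", "humor", "funny"].any (fun x => PySem.Str.isIn x cat_lower) then
    "comedy"
  else if ["news", "politics", "current"].any (fun x => PySem.Str.isIn x cat_lower) then
    "news"
  else if ["crime", "mystery", "true crime"].any (fun x => PySem.Str.isIn x cat_lower) then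
    "true crime"
  else if ["education", "learning", "history", "science"].any (fun x => PySem.Str.isIn x cat_lower) then
    "education"
  else if ["business", "finance", "entrepreneur", "career"].any (fun x => PySem.Str.isIn x cat_lower) then
    "business"
  else if ["health", "fitness", "wellness", "mental"].any (fun x => PySem.Str.isIn x cat_lower) then
    "health"
  else if ["sport", "football", "basketball", "soccer"].any (fun x => PySem.Str.isIn x cat_lower) then
    "sports"
  else if ["music", "song", "artist"].any (fun x => PySem.Str.isIn x cat_lower) then
    "music"
  else if ["society", "culture", "relationship"].any (fun x => PySem.Str.isIn x cat_lower) then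
    "society"
  else if ["tech", "technology", "computer", "internet"].any (fun x => PySem.Str.isIn x cat_lower) then
    "technology"
  else
    "general"

-- ===== PORT B =====
def pvGenres : List String :=
  ["comedy", "news", "true crime", "education", "business",
   "health", "sports", "music", "society", "technology"]

-- flat keyword table: keyword -> priority (= index of its genre in pvGenres)
def pvKeywords : List (String × Nat) :=
  [("comedy", 0), ("humor", 0), ("funny", 0),
   ("news", 1), ("politics", 1), ("current", 1),
   ("crime", 2), ("mystery", 2), ("true crime", 2),
   ("education", 3), ("learning", 3), ("history", 3), ("science", 3),
   ("business", 4), ("finance", 4), ("entrepreneur", 4), ("career", 4),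
   ("health", 5), ("fitness", 5), ("wellness", 5), ("mental", 5),
   ("sport", 6), ("football", 6), ("basketball", 6), ("soccer", 6),
   ("music", 7), ("song", 7), ("artist", 7),
   ("society", 8), ("culture", 8), ("relationship", 8),
   ("tech", 9), ("technology", 9), ("computer", 9), ("internet", 9)]

def normalize_podcast_category_py_alt (category : String) : String :=
  let cat := if category ≠ "" then PySem.Str.lower category else ""
  -- for i in range(len(cat)): for kw, prio in _KEYWORDS: ...
  let best :=
    (List.range cat.toList.length).foldl
      (fun b i =>
        pvKeywords.foldl
          (fun b e =>
            -- cat.startswith(e.1, i): exact as startswith on the suffix at i (0 ≤ i < len)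
            if PySem.Chars.startswith (cat.toList.drop i) e.1.toList &&
                (match b with | none => true | some bp => decide (e.2 < bp)) then
              some e.2
            else b)
          b)
      (none : Option Nat)
  match best with
  | none => "general"
  | some p => pvGenres.getD p ""   -- _GENRES[best]; best ∈ {0..9} is always in range, so getD is exact

-- ===== PRECONDITION & SPEC =====
def Spec_normalize_podcast_category_py (category : String) (out : String) : Prop := out = normalize_podcast_category_py_alt category
instance (category : String) (out : String) : Decidable (Spec_normalize_podcast_category_py category out) := by unfold Spec_normalize_podcast_category_py; infer_instance

-- ===== CLAIM (what is proved, stated in full; the proofs are below) =====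
def Claim_equal_normalize_podcast_category_py : Prop := ∀ (category : String), Dom_normalize_podcast_category_py category → Spec_normalize_podcast_category_py category (normalize_podcast_category_py category)


-- ===== LEMMAS AND PROOFS =====

-- running-minimum step on an optional best priority
def pvMino : Option Nat → Nat → Option Nat
  | none, p => some p
  | some q, p => some (min q p)

-- priorities of the keywords that occur as substrings of cl, in table order
def pvFiltered (cl : String) : List Nat :=
  pvKeywords.filterMap (fun e => if PySem.Str.isIn e.1 cl then some e.2 else none)

-- A's rule keyword lists, indexed by priority
def pvRuleKws : Nat → List String
  | 0 => ["comedy", "humor", "funny"]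
  | 1 => ["news", "politics", "current"]
  | 2 => ["crime", "mystery", "true crime"]
  | 3 => ["education", "learning", "history", "science"]
  | 4 => ["business", "finance", "entrepreneur", "career"]
  | 5 => ["health", "fitness", "wellness", "mental"]
  | 6 => ["sport", "football", "basketball", "soccer"]
  | 7 => ["music", "song", "artist"]
  | 8 => ["society", "culture", "relationship"]
  | _ => ["tech", "technology", "computer", "internet"]

lemma pv_kw_rule : ∀ e ∈ pvKeywords, e.1 ∈ pvRuleKws e.2 := by decide

lemma pv_rule_kw : ∀ k, k ≤ 9 → ∀ x ∈ pvRuleKws k, (x, k) ∈ pvKeywords := by decide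

lemma pv_prio_le : ∀ e ∈ pvKeywords, e.2 ≤ 9 := by decide

lemma pv_kw_nonempty : ∀ e ∈ pvKeywords, e.1.toList ≠ [] := by decide

-- B's inner loop over the keyword table is a running minimum over the matching priorities
lemma pvInner (P : String → Bool) (l : List (String × Nat)) (b : Option Nat) :
    l.foldl (fun b e =>
        if P e.1 && (match b with | none => true | some bp => decide (e.2 < bp)) then
          some e.2
        else b) b
      = (l.filterMap (fun e => if P e.1 then some e.2 else none)).foldl pvMino b := by
  induction l generalizing b with
  | nil => rfl
  | cons e t ih =>
    have hstep : (if P e.1 && (match b with | none => true | some bp => decide (e.2 < bp)) then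
          some e.2 else b) = if P e.1 then pvMino b e.2 else b := by
      cases b with
      | none => cases h : P e.1 <;> simp [pvMino]
      | some q =>
        cases h : P e.1 with
        | false => simp
        | true =>
          by_cases hq : e.2 < q
          · simp [hq, pvMino, Nat.min_eq_right (Nat.le_of_lt hq)]
          · simp [hq, pvMino, Nat.min_eq_left (by omega : q ≤ e.2)]
    rw [List.foldl_cons, hstep, List.filterMap_cons]
    by_cases h : P e.1 = true
    · simp only [h, if_pos trivial, List.foldl_cons]
      exact ih (pvMino b e.2)
    · simp only [Bool.not_eq_true] at h
      simp only [h, Bool.false_eq_true, if_false]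
      exact ih b

lemma pvFoldMinoSome (l : List Nat) (q : Nat) :
    l.foldl pvMino (some q) = some (l.foldl min q) := by
  induction l generalizing q with
  | nil => rfl
  | cons a t ih => simp [pvMino, ih]

lemma pvFoldMinoNone (l : List Nat) : l.foldl pvMino none = l.min? := by
  cases l with
  | nil => rfl
  | cons a t => simp [pvMino, pvFoldMinoSome, List.min?]

lemma pvFoldFlat (g : Nat → List Nat) (is : List Nat) (b : Option Nat) :
    is.foldl (fun b i => (g i).foldl pvMino b) b = (is.flatMap g).foldl pvMino b := by
  induction is generalizing b with
  | nil => rfl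
  | cons a t ih => simp only [List.foldl_cons, List.flatMap_cons, List.foldl_append, ih]

lemma pvMinCongr (l1 l2 : List Nat) (h : ∀ x, x ∈ l1 ↔ x ∈ l2) : l1.min? = l2.min? := by
  cases h1 : l1.min? with
  | none =>
    rw [List.min?_eq_none_iff] at h1
    symm
    rw [List.min?_eq_none_iff]
    cases h2 : l2 with
    | nil => rfl
    | cons a t => exact absurd ((h a).mpr (by simp [h2])) (by simp [h1])
  | some a =>
    rw [List.min?_eq_some_iff] at h1
    symm
    rw [List.min?_eq_some_iff]
    exact ⟨(h a).mp h1.1, fun b hb => h1.2 b ((h b).mpr hb)⟩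

-- a keyword matches at some scanned position iff it is a substring
lemma pvMemIff (cl : String) (x : Nat) :
    (x ∈ (List.range cl.toList.length).flatMap (fun i =>
        pvKeywords.filterMap (fun e =>
          if PySem.Chars.startswith (cl.toList.drop i) e.1.toList then some e.2 else none)))
      ↔ x ∈ pvFiltered cl := by
  simp only [List.mem_flatMap, List.mem_range, List.mem_filterMap, pvFiltered]
  constructor
  · rintro ⟨i, hi, e, he, hif⟩
    refine ⟨e, he, ?_⟩
    rcases hs : PySem.Chars.startswith (cl.toList.drop i) e.1.toList with _ | _
    · rw [hs] at hif; simp at hif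
    · rw [hs] at hif; simp at hif
      have hin : PySem.Chars.isIn e.1.toList cl.toList = true :=
        (PySem.Chars.exists_prefix_drop_iff_isIn _ _).mp
          ⟨i, (PySem.Chars.startswith_iff _ _).mp hs⟩
      simp [PySem.Str.isIn_eq, hin, hif]
  · rintro ⟨e, he, hif⟩
    rcases hin : PySem.Str.isIn e.1 cl with _ | _
    · rw [hin] at hif; simp at hif
    · rw [hin] at hif; simp only [if_pos trivial] at hif
      rw [PySem.Str.isIn_eq] at hin
      obtain ⟨j, hpre⟩ := (PySem.Chars.exists_prefix_drop_iff_isIn _ _).mpr hin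
      have hj : j < cl.toList.length := by
        by_contra hge
        rw [List.drop_eq_nil_of_le (by omega)] at hpre
        exact pv_kw_nonempty e he (List.prefix_nil.mp hpre)
      exact ⟨j, hj, e, he, by simp [(PySem.Chars.startswith_iff _ _).mpr hpre, hif]⟩

-- B's whole double loop computes the minimum priority of the matching keywords
lemma pvB_eq (cl : String) :
    ((List.range cl.toList.length).foldl
      (fun b i =>
        pvKeywords.foldl
          (fun b e =>
            if PySem.Chars.startswith (cl.toList.drop i) e.1.toList &&
                (match b with | none => true | some bp => decide (e.2 < bp)) then
              some e.2
            else b)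
          b)
      (none : Option Nat)) = (pvFiltered cl).min? := by
  have hfun : (fun (b : Option Nat) (i : Nat) =>
      pvKeywords.foldl
        (fun b e =>
          if PySem.Chars.startswith (cl.toList.drop i) e.1.toList &&
              (match b with | none => true | some bp => decide (e.2 < bp)) then
            some e.2
          else b) b)
      = fun (b : Option Nat) (i : Nat) =>
        ((pvKeywords.filterMap (fun e =>
            if PySem.Chars.startswith (cl.toList.drop i) e.1.toList then some e.2 else none))).foldl
          pvMino b := by
    funext b i
    exact pvInner (fun s => PySem.Chars.startswith (cl.toList.drop i) s.toList) pvKeywords b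
  rw [hfun, pvFoldFlat, pvFoldMinoNone]
  exact pvMinCongr _ _ (pvMemIff cl)

-- if rule k is the first matching rule, the minimum matching priority is k
lemma pvMinBranch (cl : String) (k : Nat) (hk : k ≤ 9) (x : String) (hx : x ∈ pvRuleKws k)
    (hisin : PySem.Str.isIn x cl = true)
    (hlow : ∀ j, j < k → (pvRuleKws j).any (fun x => PySem.Str.isIn x cl) = false) :
    (pvFiltered cl).min? = some k := by
  rw [List.min?_eq_some_iff]
  have hifx : PySem.Str.isIn (x, k).1 cl = true := hisin
  refine ⟨List.mem_filterMap.mpr ⟨(x, k), pv_rule_kw k hk x hx, by rw [if_pos hifx]⟩, ?_⟩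
  · intro b hb
    obtain ⟨e, he, hif⟩ := List.mem_filterMap.mp hb
    rcases hin : PySem.Str.isIn e.1 cl with _ | _
    · rw [hin] at hif; simp at hif
    · rw [hin] at hif; simp at hif
      by_contra hlt
      have h2 : e.2 < k := by omega
      have hmatch : (pvRuleKws e.2).any (fun x => PySem.Str.isIn x cl) = true :=
        List.any_eq_true.mpr ⟨e.1, pv_kw_rule e he, hin⟩
      rw [hlow e.2 (by omega)] at hmatch
      exact absurd hmatch (by simp)

-- if no rule matches, no keyword matches
lemma pvMinNone (cl : String)
    (hall : ∀ j, j ≤ 9 → (pvRuleKws j).any (fun x => PySem.Str.isIn x cl) = false) :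
    (pvFiltered cl).min? = none := by
  rw [List.min?_eq_none_iff, pvFiltered, List.filterMap_eq_nil_iff]
  intro e he
  rcases hin : PySem.Str.isIn e.1 cl with _ | _
  · simp
  · have hmatch : (pvRuleKws e.2).any (fun x => PySem.Str.isIn x cl) = true :=
      List.any_eq_true.mpr ⟨e.1, pv_kw_rule e he, hin⟩
    rw [hall e.2 (pv_prio_le e he)] at hmatch
    exact absurd hmatch (by simp)

-- the if/elif chain equals the minimum-priority lookup
set_option maxHeartbeats 1000000 in
lemma pvMain (cl : String) :
    (if ["comedy", "humor", "funny"].any (fun x => PySem.Str.isIn x cl) then "comedy"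
  else if ["news", "politics", "current"].any (fun x => PySem.Str.isIn x cl) then "news"
  else if ["crime", "mystery", "true crime"].any (fun x => PySem.Str.isIn x cl) then "true crime"
  else if ["education", "learning", "history", "science"].any (fun x => PySem.Str.isIn x cl) then "education"
  else if ["business", "finance", "entrepreneur", "career"].any (fun x => PySem.Str.isIn x cl) then "business"
  else if ["health", "fitness", "wellness", "mental"].any (fun x => PySem.Str.isIn x cl) then "health"
  else if ["sport", "football", "basketball", "soccer"].any (fun x => PySem.Str.isIn x cl) then "sports"
  else if ["music", "song", "artist"].any (fun x => PySem.Str.isIn x cl) then "music"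
  else if ["society", "culture", "relationship"].any (fun x => PySem.Str.isIn x cl) then "society"
  else if ["tech", "technology", "computer", "internet"].any (fun x => PySem.Str.isIn x cl) then "technology"
  else "general")
      = (match (pvFiltered cl).min? with
         | none => "general"
         | some p => pvGenres.getD p "") := by
  by_cases h0 : (["comedy", "humor", "funny"].any (fun x => PySem.Str.isIn x cl)) = true
  · obtain ⟨x, hx, hp⟩ := List.any_eq_true.mp h0
    rw [pvMinBranch cl 0 (by omega) x hx hp (fun j hj => absurd hj (by omega)), if_pos h0]
    rfl
  simp only [Bool.not_eq_true] at h0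
  by_cases h1 : (["news", "politics", "current"].any (fun x => PySem.Str.isIn x cl)) = true
  · obtain ⟨x, hx, hp⟩ := List.any_eq_true.mp h1
    rw [pvMinBranch cl 1 (by omega) x hx hp (by intro j hj; interval_cases j <;> simp only [pvRuleKws] <;> assumption), if_neg (by rw [h0]; exact Bool.false_ne_true), if_pos h1]
    rfl
  simp only [Bool.not_eq_true] at h1
  by_cases h2 : (["crime", "mystery", "true crime"].any (fun x => PySem.Str.isIn x cl)) = true
  · obtain ⟨x, hx, hp⟩ := List.any_eq_true.mp h2
    rw [pvMinBranch cl 2 (by omega) x hx hp (by intro j hj; interval_cases j <;> simp only [pvRuleKws] <;> assumption), if_neg (by rw [h0]; exact Bool.false_ne_true), if_neg (by rw [h1]; exact Bool.false_ne_true), if_pos h2]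
    rfl
  simp only [Bool.not_eq_true] at h2
  by_cases h3 : (["education", "learning", "history", "science"].any (fun x => PySem.Str.isIn x cl)) = true
  · obtain ⟨x, hx, hp⟩ := List.any_eq_true.mp h3
    rw [pvMinBranch cl 3 (by omega) x hx hp (by intro j hj; interval_cases j <;> simp only [pvRuleKws] <;> assumption), if_neg (by rw [h0]; exact Bool.false_ne_true), if_neg (by rw [h1]; exact Bool.false_ne_true), if_neg (by rw [h2]; exact Bool.false_ne_true), if_pos h3]
    rfl
  simp only [Bool.not_eq_true] at h3
  by_cases h4 : (["business", "finance", "entrepreneur", "career"].any (fun x => PySem.Str.isIn x cl)) = true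
  · obtain ⟨x, hx, hp⟩ := List.any_eq_true.mp h4
    rw [pvMinBranch cl 4 (by omega) x hx hp (by intro j hj; interval_cases j <;> simp only [pvRuleKws] <;> assumption), if_neg (by rw [h0]; exact Bool.false_ne_true), if_neg (by rw [h1]; exact Bool.false_ne_true), if_neg (by rw [h2]; exact Bool.false_ne_true), if_neg (by rw [h3]; exact Bool.false_ne_true), if_pos h4]
    rfl
  simp only [Bool.not_eq_true] at h4
  by_cases h5 : (["health", "fitness", "wellness", "mental"].any (fun x => PySem.Str.isIn x cl)) = true
  · obtain ⟨x, hx, hp⟩ := List.any_eq_true.mp h5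
    rw [pvMinBranch cl 5 (by omega) x hx hp (by intro j hj; interval_cases j <;> simp only [pvRuleKws] <;> assumption), if_neg (by rw [h0]; exact Bool.false_ne_true), if_neg (by rw [h1]; exact Bool.false_ne_true), if_neg (by rw [h2]; exact Bool.false_ne_true), if_neg (by rw [h3]; exact Bool.false_ne_true), if_neg (by rw [h4]; exact Bool.false_ne_true), if_pos h5]
    rfl
  simp only [Bool.not_eq_true] at h5
  by_cases h6 : (["sport", "football", "basketball", "soccer"].any (fun x => PySem.Str.isIn x cl)) = true
  · obtain ⟨x, hx, hp⟩ := List.any_eq_true.mp h6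
    rw [pvMinBranch cl 6 (by omega) x hx hp (by intro j hj; interval_cases j <;> simp only [pvRuleKws] <;> assumption), if_neg (by rw [h0]; exact Bool.false_ne_true), if_neg (by rw [h1]; exact Bool.false_ne_true), if_neg (by rw [h2]; exact Bool.false_ne_true), if_neg (by rw [h3]; exact Bool.false_ne_true), if_neg (by rw [h4]; exact Bool.false_ne_true), if_neg (by rw [h5]; exact Bool.false_ne_true), if_pos h6]
    rfl
  simp only [Bool.not_eq_true] at h6
  by_cases h7 : (["music", "song", "artist"].any (fun x => PySem.Str.isIn x cl)) = true
  · obtain ⟨x, hx, hp⟩ := List.any_eq_true.mp h7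
    rw [pvMinBranch cl 7 (by omega) x hx hp (by intro j hj; interval_cases j <;> simp only [pvRuleKws] <;> assumption), if_neg (by rw [h0]; exact Bool.false_ne_true), if_neg (by rw [h1]; exact Bool.false_ne_true), if_neg (by rw [h2]; exact Bool.false_ne_true), if_neg (by rw [h3]; exact Bool.false_ne_true), if_neg (by rw [h4]; exact Bool.false_ne_true), if_neg (by rw [h5]; exact Bool.false_ne_true), if_neg (by rw [h6]; exact Bool.false_ne_true), if_pos h7]
    rfl
  simp only [Bool.not_eq_true] at h7
  by_cases h8 : (["society", "culture", "relationship"].any (fun x => PySem.Str.isIn x cl)) = true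
  · obtain ⟨x, hx, hp⟩ := List.any_eq_true.mp h8
    rw [pvMinBranch cl 8 (by omega) x hx hp (by intro j hj; interval_cases j <;> simp only [pvRuleKws] <;> assumption), if_neg (by rw [h0]; exact Bool.false_ne_true), if_neg (by rw [h1]; exact Bool.false_ne_true), if_neg (by rw [h2]; exact Bool.false_ne_true), if_neg (by rw [h3]; exact Bool.false_ne_true), if_neg (by rw [h4]; exact Bool.false_ne_true), if_neg (by rw [h5]; exact Bool.false_ne_true), if_neg (by rw [h6]; exact Bool.false_ne_true), if_neg (by rw [h7]; exact Bool.false_ne_true), if_pos h8]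
    rfl
  simp only [Bool.not_eq_true] at h8
  by_cases h9 : (["tech", "technology", "computer", "internet"].any (fun x => PySem.Str.isIn x cl)) = true
  · obtain ⟨x, hx, hp⟩ := List.any_eq_true.mp h9
    rw [pvMinBranch cl 9 (by omega) x hx hp (by intro j hj; interval_cases j <;> simp only [pvRuleKws] <;> assumption), if_neg (by rw [h0]; exact Bool.false_ne_true), if_neg (by rw [h1]; exact Bool.false_ne_true), if_neg (by rw [h2]; exact Bool.false_ne_true), if_neg (by rw [h3]; exact Bool.false_ne_true), if_neg (by rw [h4]; exact Bool.false_ne_true), if_neg (by rw [h5]; exact Bool.false_ne_true), if_neg (by rw [h6]; exact Bool.false_ne_true), if_neg (by rw [h7]; exact Bool.false_ne_true), if_neg (by rw [h8]; exact Bool.false_ne_true), if_pos h9]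
    rfl
  simp only [Bool.not_eq_true] at h9
  rw [pvMinNone cl (by intro j hj; interval_cases j <;> simp only [pvRuleKws] <;> assumption), if_neg (by rw [h0]; exact Bool.false_ne_true), if_neg (by rw [h1]; exact Bool.false_ne_true), if_neg (by rw [h2]; exact Bool.false_ne_true), if_neg (by rw [h3]; exact Bool.false_ne_true), if_neg (by rw [h4]; exact Bool.false_ne_true), if_neg (by rw [h5]; exact Bool.false_ne_true), if_neg (by rw [h6]; exact Bool.false_ne_true), if_neg (by rw [h7]; exact Bool.false_ne_true), if_neg (by rw [h8]; exact Bool.false_ne_true), if_neg (by rw [h9]; exact Bool.false_ne_true)]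


-- ===== VERDICT (by name: the statement is the Claim_ definition above) =====
theorem normalize_podcast_category_py_spec : Claim_equal_normalize_podcast_category_py := by
  intro category _
  unfold Spec_normalize_podcast_category_py normalize_podcast_category_py
    normalize_podcast_category_py_alt
  dsimp only
  rw [pvB_eq]
  exact pvMain _
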